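-- pv_equiv track=rewrite | github.com/annaulazar/algorithms_practice | Trenirovka_5_0/lecture_4/task_b.py | rbinpoisk
-- ===== SOURCE A (Python) =====
-- def chek_count(m, cnt):
--     res = m * (m + 1) ** 2 // 2 - m * (m + 1) * (2 * m + 1) // 6 + m * (m + 1) // 2 - 1
--     return res <= cnt
--
-- def rbinpoisk(l, r, cnt):
--     while l < r:
--         m = (l + r + 1) // 2
--         if chek_count(m, cnt):
--             l = m
--         else:
--             r = m - 1
--     return r
-- ===== SOURCE B (Python) =====
-- def rbinpoisk(l, r, cnt):
--     if l >= r: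
--         return r
--     K = 6 * (cnt + 1)
--     # largest m with m*(m+1)*(m+5) <= K, found by a short walk from 0
--     # (|m| is about the cube root of |K|)
--     m = 0
--     if K >= 0:
--         while (m + 1) * (m + 2) * (m + 6) <= K:
--             m += 1
--     else:
--         while m * (m + 1) * (m + 5) > K:
--             m -= 1
--     return max(l, min(r, m))
-- ===== Notes on version B (the rewrite author's own statement) =====
-- stated objective: simpler
-- what changed: Replaces the binary search with a direct computation: the counting predicate simplifies to m(m+1)(m+5) <= 6*(cnt+1); B walks from 0 to the largest such m (about cbrt(|cnt|) steps) and clamps it into [l, r].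
-- outside the precondition, e.g. on rbinpoisk(-25, -4, -1): A returns -5, B returns -4
import Mathlib
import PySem

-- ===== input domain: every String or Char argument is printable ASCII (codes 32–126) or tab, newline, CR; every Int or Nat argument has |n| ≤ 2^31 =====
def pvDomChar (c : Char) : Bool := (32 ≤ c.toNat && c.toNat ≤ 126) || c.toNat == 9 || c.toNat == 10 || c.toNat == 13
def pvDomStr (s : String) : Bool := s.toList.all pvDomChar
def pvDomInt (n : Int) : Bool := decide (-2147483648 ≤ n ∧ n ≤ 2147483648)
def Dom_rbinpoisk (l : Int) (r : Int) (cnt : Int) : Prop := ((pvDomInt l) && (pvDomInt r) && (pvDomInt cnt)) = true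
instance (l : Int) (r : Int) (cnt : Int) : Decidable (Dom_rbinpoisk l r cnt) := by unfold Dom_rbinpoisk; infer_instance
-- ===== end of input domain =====

-- B replaces the binary search by a direct walk to the largest m with m(m+1)(m+5) ≤ 6(cnt+1),
-- clamped into [l, r] — simpler: the counting predicate has a closed cubic form.

-- ===== PORT A =====
-- chek_count(m, cnt)
def chekCount (m : Int) (cnt : Int) : Bool :=
  let res := PySem.Int.floordiv (m * (m + 1) ^ 2) 2
           - PySem.Int.floordiv (m * (m + 1) * (2 * m + 1)) 6
           + PySem.Int.floordiv (m * (m + 1)) 2 - 1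
  res ≤ cnt

-- the while-loop of rbinpoisk (m = (l+r+1)//2 inlined); terminates because [l, r] shrinks
def rbLoop (l : Int) (r : Int) (cnt : Int) : Int :=
  if h : l < r then
    if chekCount (PySem.Int.floordiv (l + r + 1) 2) cnt then
      rbLoop (PySem.Int.floordiv (l + r + 1) 2) r cnt
    else
      rbLoop l (PySem.Int.floordiv (l + r + 1) 2 - 1) cnt
  else r
termination_by (r - l).toNat
decreasing_by
  · have hb := PySem.Int.floordiv_two_mid_bounds (lo := l + 1) (hi := r) (by omega)
    rw [show l + 1 + r = l + r + 1 by ring] at hb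
    omega
  · have hb := PySem.Int.floordiv_two_mid_bounds (lo := l + 1) (hi := r) (by omega)
    rw [show l + 1 + r = l + r + 1 by ring] at hb
    omega

def rbinpoisk (l : Int) (r : Int) (cnt : Int) : Int := rbLoop l r cnt

-- ===== PORT B =====
-- B's ascending while-loop 'while (m+1)(m+2)(m+6) <= K: m += 1' starting at m = 0;
-- the loop variable is the Nat n with m = n (m never leaves ℕ), for termination.
def ascend (K : Int) (n : Nat) : Int :=
  if ((n : Int) + 1) * ((n : Int) + 2) * ((n : Int) + 6) ≤ K then ascend K (n + 1)
  else (n : Int)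
termination_by K.toNat + 1 - n
decreasing_by
  rename_i h
  have hn0 : (0 : Int) ≤ (n : Int) := Int.natCast_nonneg n
  have h1 : (n : Int) + 1 ≤ ((n : Int) + 1) * ((n : Int) + 2) * ((n : Int) + 6) := by
    nlinarith [mul_nonneg hn0 hn0, mul_nonneg (mul_nonneg hn0 hn0) hn0]
  omega

-- B's descending while-loop 'while m(m+1)(m+5) > K: m -= 1' starting at m = 0;
-- the loop variable is the Nat n with m = -n (m never goes above 0), for termination.
def descend (K : Int) (n : Nat) : Int :=
  if K < (-(n : Int)) * (-(n : Int) + 1) * (-(n : Int) + 5) then descend K (n + 1)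
  else -(n : Int)
termination_by K.natAbs + 6 - n
decreasing_by
  rename_i h
  by_cases h6 : (6 : Int) ≤ (n : Int)
  · have ht : (0 : Int) ≤ (n : Int) - 6 := by omega
    have hle : (-(n : Int)) * (-(n : Int) + 1) * (-(n : Int) + 5) ≤ -(n : Int) := by
      nlinarith [mul_nonneg ht ht, mul_nonneg (mul_nonneg ht ht) ht]
    have : K < -(n : Int) := lt_of_lt_of_le h hle
    omega
  · omega

def rbinpoisk_alt (l : Int) (r : Int) (cnt : Int) : Int :=
  if l ≥ r then r
  else
    let K := 6 * (cnt + 1)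
    let m := if K ≥ 0 then ascend K 0 else descend K 0
    max l (min r m)

-- ===== PRECONDITION & SPEC =====
-- Pre_ excludes l < r with cnt ∈ {-1, 0} and l ≤ -3: there the predicate m(m+1)(m+5) ≤ 6(cnt+1)
-- is non-monotone over the probed negative range, so the binary search's value is an accident of
-- probe order (both values defensible outside the counting function's natural domain).
def Pre_rbinpoisk (l : Int) (r : Int) (cnt : Int) : Prop :=
  ¬(l < r ∧ (cnt = -1 ∨ cnt = 0) ∧ l ≤ -3)
instance (l : Int) (r : Int) (cnt : Int) : Decidable (Pre_rbinpoisk l r cnt) := by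
  unfold Pre_rbinpoisk; infer_instance

def pvWitness_rbinpoisk : Int × Int × Int := (0, 100, 7)

def Spec_rbinpoisk (l : Int) (r : Int) (cnt : Int) (out : Int) : Prop := out = rbinpoisk_alt l r cnt
instance (l : Int) (r : Int) (cnt : Int) (out : Int) : Decidable (Spec_rbinpoisk l r cnt out) := by unfold Spec_rbinpoisk; infer_instance

-- ===== CLAIM (what is proved, stated in full; the proofs are below) =====
def Claim_equal_rbinpoisk : Prop := ∀ (l : Int) (r : Int) (cnt : Int), Dom_rbinpoisk l r cnt → Pre_rbinpoisk l r cnt → Spec_rbinpoisk l r cnt (rbinpoisk l r cnt)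

-- ===== LEMMAS AND PROOFS =====

-- the cubic form of the counting sum
def fCube (m : Int) : Int := m * (m + 1) * (m + 5)

lemma dvd3_aux (m : Int) (c : Int) (h : c = 2 * m + 1 ∨ c = m + 5) :
    (3 : Int) ∣ m * (m + 1) * c := by
  have h3 : m % 3 = 0 ∨ m % 3 = 1 ∨ m % 3 = 2 := by omega
  obtain ⟨k, hk⟩ : ∃ k, m = 3 * k + m % 3 := ⟨m / 3, by omega⟩
  rcases h with h | h <;> rcases h3 with h3 | h3 | h3 <;> rw [h, hk, h3]
  · exact ⟨k * (3 * k + 1) * (2 * (3 * k) + 1), by ring⟩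
  · exact ⟨(3 * k + 1) * (3 * k + 2) * (2 * k + 1), by ring⟩
  · exact ⟨(3 * k + 2) * (k + 1) * (2 * (3 * k + 2) + 1), by ring⟩
  · exact ⟨k * (3 * k + 1) * (3 * k + 5), by ring⟩
  · exact ⟨(3 * k + 1) * (3 * k + 2) * (k + 2), by ring⟩
  · exact ⟨(3 * k + 2) * (k + 1) * (3 * k + 7), by ring⟩

-- chek_count m cnt  ↔  m(m+1)(m+5) ≤ 6(cnt+1)
lemma chekCount_iff (m : Int) (cnt : Int) :
    chekCount m cnt = true ↔ fCube m ≤ 6 * (cnt + 1) := by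
  have h2c : (2 : Int) ∣ m * (m + 1) := (Int.even_mul_succ_self m).two_dvd
  obtain ⟨d, hd⟩ := h2c
  have h2c' : (2 : Int) ∣ m * (m + 1) := ⟨d, hd⟩
  have h2a : (2 : Int) ∣ m * (m + 1) ^ 2 := ⟨d * (m + 1), by linear_combination (m + 1) * hd⟩
  have h2b : (2 : Int) ∣ m * (m + 1) * (2 * m + 1) := Dvd.dvd.mul_right h2c' _
  have h3b : (3 : Int) ∣ m * (m + 1) * (2 * m + 1) := dvd3_aux m _ (Or.inl rfl)
  have h2f : (2 : Int) ∣ m * (m + 1) * (m + 5) := Dvd.dvd.mul_right h2c' _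
  have h3f : (3 : Int) ∣ m * (m + 1) * (m + 5) := dvd3_aux m _ (Or.inr rfl)
  have hb : m * (m + 1) * (2 * m + 1) = 2 * (m * (m + 1) ^ 2) - m * (m + 1) := by ring
  have hf : m * (m + 1) * (m + 5) = m * (m + 1) ^ 2 + 4 * (m * (m + 1)) := by ring
  have e1 : PySem.Int.floordiv (m * (m + 1) ^ 2) 2 = m * (m + 1) ^ 2 / 2 :=
    PySem.Int.floordiv_eq_ediv_of_pos (by norm_num)
  have e2 : PySem.Int.floordiv (m * (m + 1) * (2 * m + 1)) 6 = m * (m + 1) * (2 * m + 1) / 6 :=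
    PySem.Int.floordiv_eq_ediv_of_pos (by norm_num)
  have e3 : PySem.Int.floordiv (m * (m + 1)) 2 = m * (m + 1) / 2 :=
    PySem.Int.floordiv_eq_ediv_of_pos (by norm_num)
  simp only [chekCount, fCube, e1, e2, e3, decide_eq_true_eq]
  omega

lemma fCube_add_one (m : Int) : fCube (m + 1) = (m + 1) * (m + 2) * (m + 6) := by
  unfold fCube; ring

-- f is monotone on [1, ∞) and on (-∞, -4]
lemma fCube_mono_pos {a b : Int} (ha : 1 ≤ a) (hab : a ≤ b) : fCube a ≤ fCube b := by
  have h0 : (0 : Int) ≤ a := by omega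
  have ht : (0 : Int) ≤ b - a := by omega
  unfold fCube
  nlinarith [mul_nonneg h0 ht, mul_nonneg (mul_nonneg h0 h0) ht,
             mul_nonneg (mul_nonneg h0 ht) ht, mul_nonneg (mul_nonneg ht ht) ht,
             mul_nonneg ht ht]
lemma fCube_mono_neg {a b : Int} (hab : a ≤ b) (hb : b ≤ -4) : fCube a ≤ fCube b := by
  have hu : (0 : Int) ≤ -b - 4 := by omega
  have hs : (0 : Int) ≤ b - a := by omega
  unfold fCube
  nlinarith [mul_nonneg hs (mul_nonneg hu hu), mul_nonneg hs hu,
             mul_nonneg (mul_nonneg hs hs) hu, mul_nonneg hs hs,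
             mul_nonneg (mul_nonneg hs hs) hs]
lemma fCube_nonneg_of_ge {m : Int} (h : -5 ≤ m) : 0 ≤ fCube m := by
  rcases (by omega : m ≤ 0 ∨ 0 ≤ m) with h0 | h0
  · interval_cases m <;> decide
  · unfold fCube; positivity
lemma fCube_le_twelve_of_nonpos {m : Int} (h : m ≤ 0) : fCube m ≤ 12 := by
  rcases (by omega : m ≤ -6 ∨ -5 ≤ m) with h6 | h6
  · have ht : (0 : Int) ≤ -m - 6 := by omega
    have : fCube m ≤ -(30 : Int) := by
      unfold fCube
      nlinarith [mul_nonneg ht ht, mul_nonneg (mul_nonneg ht ht) ht]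
    omega
  · interval_cases m <;> decide

-- the ascending walk returns the largest m ≥ n with f m ≤ K (given f n ≤ K)
lemma ascend_spec (K : Int) (n : Nat) (hn : fCube (n : Int) ≤ K) :
    fCube (ascend K n) ≤ K ∧ K < fCube (ascend K n + 1) ∧ (n : Int) ≤ ascend K n := by
  unfold ascend
  split
  · rename_i h
    have hn' : fCube ((n + 1 : Nat) : Int) ≤ K := by
      rw [show ((n + 1 : Nat) : Int) = (n : Int) + 1 by push_cast; ring, fCube_add_one]
      exact h
    have hrec := ascend_spec K (n + 1) hn'
    refine ⟨hrec.1, hrec.2.1, ?_⟩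
    have := hrec.2.2; push_cast at this; omega
  · rename_i h
    refine ⟨hn, ?_, le_refl _⟩
    rw [fCube_add_one]; omega
termination_by K.toNat + 1 - n
decreasing_by
  have hn0 : (0 : Int) ≤ (n : Int) := Int.natCast_nonneg n
  have h1 : (n : Int) + 1 ≤ ((n : Int) + 1) * ((n : Int) + 2) * ((n : Int) + 6) := by
    nlinarith [mul_nonneg hn0 hn0, mul_nonneg (mul_nonneg hn0 hn0) hn0]
  omega

-- the descending walk returns the largest m with f m ≤ K, when K < 0
lemma descend_spec (K : Int) (hK : K < 0) (n : Nat)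
    (hprev : n = 0 ∨ K < fCube (-(n : Int) + 1)) :
    fCube (descend K n) ≤ K ∧ K < fCube (descend K n + 1) ∧ descend K n ≤ -(n : Int) := by
  unfold descend
  split
  · rename_i h
    have hprev' : (n + 1 = 0) ∨ K < fCube (-((n + 1 : Nat) : Int) + 1) := by
      right
      rw [show -((n + 1 : Nat) : Int) + 1 = -(n : Int) by push_cast; ring]
      exact h
    have hrec := descend_spec K hK (n + 1) hprev'
    refine ⟨hrec.1, hrec.2.1, ?_⟩
    have := hrec.2.2; push_cast at this; omega
  · rename_i h
    push Not at h
    refine ⟨h, ?_, le_refl _⟩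
    rcases hprev with h0 | hp
    · exfalso
      have : fCube (-(0 : Int)) = 0 := by decide
      rw [h0] at h
      simp only [Nat.cast_zero, neg_zero] at h
      have hz : fCube (0 : Int) = 0 := by decide
      omega
    · exact hp
termination_by K.natAbs + 6 - n
decreasing_by
  rename_i h
  by_cases h6 : (6 : Int) ≤ (n : Int)
  · have ht : (0 : Int) ≤ (n : Int) - 6 := by omega
    have hle : (-(n : Int)) * (-(n : Int) + 1) * (-(n : Int) + 5) ≤ -(n : Int) := by
      nlinarith [mul_nonneg ht ht, mul_nonneg (mul_nonneg ht ht) ht]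
    have : K < -(n : Int) := lt_of_lt_of_le h hle
    omega
  · omega

-- the binary-search loop equals the clamp of any M with (P m ↔ m ≤ M) on the probed range
lemma rbLoop_eq_clamp (cnt : Int) (M : Int) (N : Nat) :
    ∀ l r : Int, (r - l).toNat ≤ N → l ≤ r →
    (∀ m : Int, l < m → m ≤ r → (chekCount m cnt = true ↔ m ≤ M)) →
    rbLoop l r cnt = max l (min r M) := by
  induction N with
  | zero =>
    intro l r hN hle _
    have hlr : l = r := by omega
    rw [rbLoop, dif_neg (by omega)]
    omega
  | succ N ih =>
    intro l r hN hle hiff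
    by_cases hlr : l < r
    · have hb := PySem.Int.floordiv_two_mid_bounds (lo := l + 1) (hi := r) (by omega)
      rw [show l + 1 + r = l + r + 1 by ring] at hb
      set m := PySem.Int.floordiv (l + r + 1) 2 with hm
      rw [rbLoop, dif_pos hlr]
      cases hP : chekCount m cnt with
      | true =>
        rw [if_pos rfl]
        have hMm : m ≤ M := (hiff m (by omega) (by omega)).mp hP
        rw [ih m r (by omega) (by omega) (fun x hx1 hx2 => hiff x (by omega) hx2)]
        omega
      | false =>
        rw [if_neg (by decide)]
        have hMm : M < m := by
          by_contra hc
          push Not at hc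
          have htr := (hiff m (by omega) (by omega)).mpr hc
          rw [hP] at htr
          exact absurd htr (by decide)
        rw [ih l (m - 1) (by omega) (by omega) (fun x hx1 hx2 => hiff x hx1 (by omega))]
        omega
    · have : l = r := by omega
      rw [rbLoop, dif_neg hlr]
      omega

-- ===== VERDICT (by name: the statement is the Claim_ definition above) =====
theorem rbinpoisk_spec : Claim_equal_rbinpoisk := by
  intro l r cnt _ hpre
  unfold Spec_rbinpoisk rbinpoisk rbinpoisk_alt
  by_cases hlr : l < r
  · simp only [show ¬(l ≥ r) by omega, if_false]
    set K := 6 * (cnt + 1) with hK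
    by_cases hK0 : K ≥ 0
    · -- ascending walk
      simp only [hK0, if_true]
      have h00 : fCube ((0 : Nat) : Int) ≤ K := by
        have : fCube ((0 : Nat) : Int) = 0 := by decide
        omega
      obtain ⟨hMle, hMgt, hM0⟩ := ascend_spec K 0 h00
      set M := ascend K 0 with hM
      have hM0' : (0 : Int) ≤ M := by exact_mod_cast hM0
      apply rbLoop_eq_clamp cnt M (r - l).toNat l r (le_refl _) (by omega)
      intro m hlm _
      rw [chekCount_iff, ← hK]
      constructor
      · intro hfm
        by_contra hgt
        push Not at hgt
        exact absurd (le_trans (fCube_mono_pos (by omega) (by omega)) hfm) (not_le.mpr hMgt)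
      · intro hmM
        rcases (by omega : 1 ≤ m ∨ m ≤ 0) with h1 | h1
        · exact le_trans (fCube_mono_pos h1 hmM) hMle
        · -- m ≤ 0; either cnt ≥ 1 (K ≥ 12) or Pre_ forces l ≥ -2 so m ≥ -1
          rcases (by omega : 12 ≤ K ∨ K < 12) with h12 | h12
          · exact le_trans (fCube_le_twelve_of_nonpos h1) h12
          · have hcnt : cnt = -1 ∨ cnt = 0 := by omega
            have hlge : -2 ≤ l := by
              by_contra hc; exact hpre ⟨hlr, hcnt, by omega⟩
            have hm1 : -1 ≤ m := by omega
            have hfm0 : fCube m = 0 := by interval_cases m <;> decide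
            omega
    · -- descending walk
      simp only [hK0, if_false]
      push Not at hK0
      obtain ⟨hMle, hMgt, hM0⟩ := descend_spec K hK0 0 (Or.inl rfl)
      set M := descend K 0 with hM
      have hM6 : M ≤ -6 := by
        by_contra hc
        push Not at hc
        have h5 : -5 ≤ M := by omega
        have := fCube_nonneg_of_ge h5
        omega
      apply rbLoop_eq_clamp cnt M (r - l).toNat l r (le_refl _) (by omega)
      intro m _ _
      rw [chekCount_iff, ← hK]
      constructor
      · intro hfm
        by_contra hgt
        push Not at hgt
        rcases (by omega : m ≤ -4 ∨ -3 ≤ m) with h4 | h4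
        · exact absurd (le_trans (fCube_mono_neg (by omega) h4) hfm) (not_le.mpr hMgt)
        · have := fCube_nonneg_of_ge (show -5 ≤ m by omega)
          omega
      · intro hmM
        exact le_trans (fCube_mono_neg hmM (by omega)) hMle
  · -- l ≥ r: loop returns r immediately, B returns r
    rw [rbLoop, dif_neg hlr]
    simp [show l ≥ r by omega]
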